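-- pv_equiv track=rewrite | github.com/Swarchal/learning_c | problem_28.py | make_corner_seq
-- ===== SOURCE A (Python) =====
-- def make_corner_seq(n):
--     """sequence of length n of corner numbers"""
--     seq = [1]
--     step_size = 2
--     while len(seq) < n:
--         for i in range(4):
--             seq.append(seq[-1] + step_size)
--         step_size += 2
--     return seq
-- ===== SOURCE B (Python) =====
-- def make_corner_seq(n):
--     """sequence of length n of corner numbers"""
--     m = max(0, -((1 - n) // 4))  # number of 4-element batches = ceil((n-1)/4), at least 0
--     out = []
--     for k in range(1 + 4 * m):
--         if k == 0:
--             out.append(1)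
--         else:
--             q, r = divmod(k - 1, 4)
--             out.append(1 + 4 * q * (q + 1) + 2 * (r + 1) * (q + 1))
--     return out
-- ===== Notes on version B (the rewrite author's own statement) =====
-- stated objective: alternative
-- what changed: Replaces A's while-loop that grows the list in 4-element batches with a mutable step size by a length-first single pass: the final length 1+4*ceil((n-1)/4) is computed in closed form and each element is emitted directly from a closed-form formula of its index.
import Mathlib
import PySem

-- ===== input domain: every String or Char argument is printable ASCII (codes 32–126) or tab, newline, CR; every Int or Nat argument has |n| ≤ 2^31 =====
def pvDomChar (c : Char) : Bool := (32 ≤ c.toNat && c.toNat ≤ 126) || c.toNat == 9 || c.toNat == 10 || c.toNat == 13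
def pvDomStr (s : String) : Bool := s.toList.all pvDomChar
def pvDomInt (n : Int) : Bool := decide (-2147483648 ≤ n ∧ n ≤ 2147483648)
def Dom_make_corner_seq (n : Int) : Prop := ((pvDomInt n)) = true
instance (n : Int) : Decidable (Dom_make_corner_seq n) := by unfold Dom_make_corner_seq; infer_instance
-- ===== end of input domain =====

-- B builds the result length-first from a closed-form per-index formula instead of A's
-- batch-growing while loop with a mutable step size (objective: alternative).

-- ===== PORT A =====
-- inner `for i in range(4): seq.append(seq[-1] + step_size)` (loop body ignores i)
def cornerBatch (seq : List Int) (step : Int) : List Int :=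
  (List.range 4).foldl (fun s _ => s ++ [PySem.List.pyGetD s (-1) 0 + step]) seq
  -- pyGetD default 0 is never used: seq is always nonempty, matching Python's seq[-1]

theorem cornerBatch_length (seq : List Int) (step : Int) :
    (cornerBatch seq step).length = seq.length + 4 := by
  simp [cornerBatch, List.range_succ]

def cornerLoop (seq : List Int) (step n : Int) : List Int :=
  if h : (seq.length : Int) < n then
    cornerLoop (cornerBatch seq step) (step + 2) n
  else seq
termination_by (n - seq.length).toNat
decreasing_by
  rw [cornerBatch_length]
  omega

def make_corner_seq (n : Int) : List Int := cornerLoop [1] 2 n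

-- ===== PORT B =====
def cornerVal (k : Int) : Int :=
  if k == 0 then 1
  else
    let q := PySem.Int.floordiv (k - 1) 4
    let r := PySem.Int.mod (k - 1) 4
    1 + 4 * q * (q + 1) + 2 * (r + 1) * (q + 1)

def make_corner_seq_alt (n : Int) : List Int :=
  let m := max 0 (-(PySem.Int.floordiv (1 - n) 4))
  (PySem.List.pyRange 0 (1 + 4 * m) 1).foldl (fun out k => out ++ [cornerVal k]) []

-- ===== PRECONDITION & SPEC =====
def Spec_make_corner_seq (n : Int) (out : List Int) : Prop := out = make_corner_seq_alt n
instance (n : Int) (out : List Int) : Decidable (Spec_make_corner_seq n out) := by unfold Spec_make_corner_seq; infer_instance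

-- ===== CLAIM (what is proved, stated in full; the proofs are below) =====
def Claim_equal_make_corner_seq : Prop := ∀ (n : Int), Dom_make_corner_seq n → Spec_make_corner_seq n (make_corner_seq n)

-- ===== LEMMAS AND PROOFS =====

-- closed-form value of index k, in Nat arithmetic
def genVal (k : Nat) : Int :=
  if k = 0 then 1
  else
    let q : Int := ((k - 1) / 4 : Nat)
    let r : Int := ((k - 1) % 4 : Nat)
    1 + 4 * q * (q + 1) + 2 * (r + 1) * (q + 1)

-- A's list after m complete batches
def gen (m : Nat) : List Int := (List.range (1 + 4 * m)).map genVal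

theorem cornerVal_natCast (k : Nat) : cornerVal (k : Int) = genVal k := by
  unfold cornerVal genVal
  rcases Nat.eq_zero_or_pos k with h | h
  · subst h; simp
  · have hk : ((k : Int) - 1) = ((k - 1 : Nat) : Int) := by omega
    have h0 : ((k : Int) == 0) = false := by simp; omega
    have hq : PySem.Int.floordiv ((k - 1 : Nat) : Int) 4 = (((k - 1) / 4 : Nat) : Int) := by
      exact_mod_cast PySem.Int.floordiv_natCast (k - 1) 4
    have hr : PySem.Int.mod ((k - 1 : Nat) : Int) 4 = (((k - 1) % 4 : Nat) : Int) := by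
      exact_mod_cast PySem.Int.mod_natCast (k - 1) 4
    rw [h0, hk, hq, hr, if_neg (by omega : ¬ k = 0)]
    simp

theorem gen_length (m : Nat) : ((gen m).length : Int) = 1 + 4 * m := by
  simp [gen]

theorem genVal_last (m : Nat) : genVal (4 * m) = 1 + 4 * m * (m + 1) := by
  unfold genVal
  rcases Nat.eq_zero_or_pos m with h | h
  · subst h; simp
  · have h0 : ¬ (4 * m = 0) := by omega
    have hq : (4 * m - 1) / 4 = m - 1 := by omega
    have hr : (4 * m - 1) % 4 = 3 := by omega
    rw [if_neg h0, hq, hr]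
    have h1 : ((m - 1 : Nat) : Int) = (m : Int) - 1 := by omega
    rw [h1]
    push_cast
    ring

theorem gen_succ (m : Nat) :
    gen (m + 1) =
      gen m ++ [genVal (4*m+1), genVal (4*m+2), genVal (4*m+3), genVal (4*m+4)] := by
  unfold gen
  have h : 1 + 4 * (m + 1) = ((((1 + 4 * m) + 1) + 1) + 1) + 1 := by omega
  rw [h, List.range_succ, List.range_succ, List.range_succ, List.range_succ]
  simp only [List.map_append, List.map_cons, List.map_nil, List.append_assoc]
  have a1 : 1 + 4 * m = 4 * m + 1 := by omega
  have a2 : 1 + 4 * m + 1 = 4 * m + 2 := by omega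
  have a3 : 1 + 4 * m + 1 + 1 = 4 * m + 3 := by omega
  have a4 : 1 + 4 * m + 1 + 1 + 1 = 4 * m + 4 := by omega
  rw [a4, a3, a2, a1]
  simp

theorem genVal_batch (m j : Nat) (hj : j < 4) :
    genVal (4 * m + 1 + j) = 1 + 4 * m * (m + 1) + 2 * (j + 1) * (m + 1) := by
  unfold genVal
  have h0 : ¬ (4 * m + 1 + j = 0) := by omega
  have hq : (4 * m + 1 + j - 1) / 4 = m := by omega
  have hr : (4 * m + 1 + j - 1) % 4 = j := by omega
  rw [if_neg h0, hq, hr]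
  try push_cast
  try ring

theorem gen_last (m : Nat) :
    PySem.List.pyGetD (gen m) (-1) 0 = 1 + 4 * m * (m + 1) := by
  have h : gen m = (List.range (4 * m)).map genVal ++ [genVal (4 * m)] := by
    unfold gen
    have h1 : 1 + 4 * m = 4 * m + 1 := by omega
    rw [h1, List.range_succ]
    simp
  rw [h, PySem.List.pyGetD_neg_one_append_singleton, genVal_last]

theorem cornerBatch_gen (m : Nat) :
    cornerBatch (gen m) (2 * m + 2) = gen (m + 1) := by
  have hL := gen_last m
  rw [gen_succ]
  unfold cornerBatch
  have h4 : List.range 4 = [0, 1, 2, 3] := by decide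
  rw [h4]
  simp only [List.foldl_cons, List.foldl_nil, hL,
    PySem.List.pyGetD_neg_one_append_singleton]
  rw [genVal_batch m 0 (by omega), genVal_batch m 1 (by omega),
      genVal_batch m 2 (by omega), genVal_batch m 3 (by omega)]
  simp only [List.append_assoc, List.cons_append, List.nil_append]
  push_cast
  refine congrArg _ ?_
  simp only [List.cons.injEq, and_true]
  refine ⟨by ring, by ring, by ring, by ring⟩

-- number of batches B computes, as a Nat
def cornerM (n : Int) : Nat := (max 0 (-(PySem.Int.floordiv (1 - n) 4))).toNat

theorem cornerM_spec (n : Int) (m : Nat) : (1 + 4 * (m : Int) < n) ↔ m < cornerM n := by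
  have h4 : (0 : Int) < 4 := by omega
  have hb := (PySem.Int.neg_floordiv_neg_eq_iff_of_pos (a := n - 1) (b := 4) h4
            (q := -(PySem.Int.floordiv (-(n - 1)) 4))).mp rfl
  have he : (1 : Int) - n = -(n - 1) := by ring
  unfold cornerM
  rw [he]
  omega

theorem cornerLoop_gen (n : Int) (m : Nat) (hm : m ≤ cornerM n) :
    cornerLoop (gen m) (2 * m + 2) n = gen (cornerM n) := by
  rw [cornerLoop]
  by_cases h : ((gen m).length : Int) < n
  · have hlt : m < cornerM n := (cornerM_spec n m).mp (by rw [gen_length m] at h; exact h)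
    rw [dif_pos h, cornerBatch_gen]
    have hs : (2 * (m : Int) + 2) + 2 = 2 * ((m + 1 : Nat) : Int) + 2 := by push_cast; ring
    rw [hs]
    exact cornerLoop_gen n (m + 1) (by omega)
  · rw [dif_neg h]
    have h1 : ¬ m < cornerM n := fun hlt => h (by rw [gen_length m]; exact (cornerM_spec n m).mpr hlt)
    have h2 : m = cornerM n := by omega
    rw [h2]
termination_by cornerM n - m

theorem alt_eq_gen (n : Int) : make_corner_seq_alt n = gen (cornerM n) := by
  unfold make_corner_seq_alt
  have hm : (max 0 (-(PySem.Int.floordiv (1 - n) 4))) = ((cornerM n : Nat) : Int) := by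
    unfold cornerM; omega
  rw [hm, PySem.List.foldl_append_singleton_eq_map, PySem.List.pyRange_one]
  unfold gen
  have hL : ((1 : Int) + 4 * ((cornerM n : Nat) : Int) - 0).toNat = 1 + 4 * cornerM n := by omega
  rw [hL, List.map_map]
  apply List.map_congr_left
  intro k _
  simp [cornerVal_natCast]

-- ===== VERDICT (by name: the statement is the Claim_ definition above) =====
theorem make_corner_seq_spec : Claim_equal_make_corner_seq := by
  intro n _
  unfold Spec_make_corner_seq
  rw [alt_eq_gen]
  have h0 : gen 0 = [1] := by decide
  have h1 : make_corner_seq n = cornerLoop (gen 0) (2 * ((0 : Nat) : Int) + 2) n := by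
    rw [h0]; rfl
  rw [h1, cornerLoop_gen n 0 (by omega)]
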